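-- pv_equiv track=rewrite | github.com/olimpinf/obi2026 | principal/utils/utils.py | slugfy
-- ===== SOURCE A (Python) =====
-- import string
--
-- def slugfy(s):
--     slug = ''
--     for c in s:
--         if c == ' ':
--             slug += '-'
--         elif c in string.ascii_letters:
--             slug += c.lower()
--     if slug == '':
--         slug = 'slug'
--     return slug
-- ===== SOURCE B (Python) =====
-- import re
-- import string
--
-- def slugfy(s):
--     # whole-string pipeline: drop everything but ASCII letters and spaces,
--     # lowercase, then turn spaces into dashes; 'slug' fallback for empty result
--     slug = re.sub(r'[^a-zA-Z ]', '', s).lower().replace(' ', '-')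
--     return slug if slug else 'slug'
-- ===== Notes on version B (the rewrite author's own statement) =====
-- stated objective: idiomatic
-- what changed: Replaces the per-character accumulator loop with three whole-string passes: a regex substitution stripping non-letter/non-space characters, then str.lower, then str.replace of spaces by dashes; the C-level passes avoid Python-level per-character work.
import Mathlib
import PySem

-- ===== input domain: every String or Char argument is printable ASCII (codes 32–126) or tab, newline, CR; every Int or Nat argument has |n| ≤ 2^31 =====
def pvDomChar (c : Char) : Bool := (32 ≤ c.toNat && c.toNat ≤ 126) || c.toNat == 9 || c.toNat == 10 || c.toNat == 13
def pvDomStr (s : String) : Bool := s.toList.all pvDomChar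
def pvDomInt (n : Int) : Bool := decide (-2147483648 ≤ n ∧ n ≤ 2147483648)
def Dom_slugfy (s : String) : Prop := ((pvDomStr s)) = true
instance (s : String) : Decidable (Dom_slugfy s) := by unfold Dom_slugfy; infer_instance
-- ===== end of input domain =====

-- B replaces A's per-character accumulator loop with three whole-string passes
-- (regex strip of non-letters/non-spaces, lower, replace ' '→'-'); same result, same cost.

-- ===== PORT A =====
-- 'c in string.ascii_letters' is exactly this ASCII-letter test
def pvIsAsciiLetter (c : Char) : Bool :=
  ('a' ≤ c && c ≤ 'z') || ('A' ≤ c && c ≤ 'Z')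

def slugfy (s : String) : String :=
  let slug := s.toList.foldl (fun acc c =>
    if c = ' ' then acc ++ ['-']
    else if pvIsAsciiLetter c then acc ++ [PySem.Chars.lowerChar c]
    else acc) []
  let slug := if slug = [] then "slug".toList else slug
  String.ofList slug

-- ===== PORT B =====
def slugfy_alt (s : String) : String :=
  -- re.sub(r'[^a-zA-Z ]', '', s): the class [^a-zA-Z ] removes exactly the
  -- characters that are neither ASCII letters nor spaces (exact on all inputs)
  let kept := String.ofList (s.toList.filter fun c => pvIsAsciiLetter c || c == ' ')
  let slug := PySem.Str.replace (PySem.Str.lower kept) " " "-"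
  if slug = "" then "slug" else slug

-- ===== PRECONDITION & SPEC =====
def Spec_slugfy (s : String) (out : String) : Prop := out = slugfy_alt s
instance (s : String) (out : String) : Decidable (Spec_slugfy s out) := by unfold Spec_slugfy; infer_instance

-- ===== CLAIM (what is proved, stated in full; the proofs are below) =====
def Claim_equal_slugfy : Prop := ∀ (s : String), Dom_slugfy s → Spec_slugfy s (slugfy s)

-- ===== LEMMAS AND PROOFS =====

-- A's loop builds exactly the filtered-and-mapped list
theorem pv_foldl_eq (l : List Char) : ∀ (acc : List Char),
    l.foldl (fun acc c =>
      if c = ' ' then acc ++ ['-']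
      else if pvIsAsciiLetter c then acc ++ [PySem.Chars.lowerChar c]
      else acc) acc
    = acc ++ ((l.filter fun c => pvIsAsciiLetter c || c == ' ').map
        fun c => if c = ' ' then '-' else PySem.Chars.lowerChar c) := by
  induction l with
  | nil => simp
  | cons c t ih =>
    intro acc
    by_cases h : c = ' '
    · subst h
      have hp : (pvIsAsciiLetter ' ' || (' ' == ' ')) = true := by decide
      simp [List.foldl_cons, ih]
    · by_cases hl : pvIsAsciiLetter c
      · have hp : (pvIsAsciiLetter c || (c == ' ')) = true := by simp [hl]
        simp [List.foldl_cons, h, hl, ih]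
      · have hp : (pvIsAsciiLetter c || (c == ' ')) = false := by simp [hl, h]
        simp [List.foldl_cons, h, hl, ih]

theorem pv_go_space (fuel : Nat) : ∀ (l acc : List Char), l.length ≤ fuel →
    PySem.Chars.replace.go [' '] ['-'] fuel l acc
    = acc.reverse ++ l.map (fun c => if c = ' ' then '-' else c) := by
  induction fuel with
  | zero =>
    intro l acc h
    have : l = [] := List.eq_nil_of_length_eq_zero (Nat.le_zero.mp h)
    subst this; simp [PySem.Chars.replace.go]
  | succ n ih =>
    intro l acc h
    cases l with
    | nil => simp [PySem.Chars.replace.go]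
    | cons c t =>
      by_cases hc : c = ' '
      · subst hc
        have hpre : [' '].isPrefixOf (' ' :: t) = true := by simp [List.isPrefixOf]
        simp only [PySem.Chars.replace.go, hpre, if_pos, List.length_cons,
          List.length_nil, List.drop_succ_cons, List.drop_zero, List.reverse_cons,
          List.reverse_nil, List.nil_append]
        rw [show ['-'] ++ acc = '-' :: acc by rfl,
          ih t ('-' :: acc) (by simpa using Nat.le_of_succ_le_succ h)]
        simp
      · have hpre : [' '].isPrefixOf (c :: t) = false := by
          simp [List.isPrefixOf, Ne.symm hc]
        simp only [PySem.Chars.replace.go, hpre]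
        rw [if_neg (by simp), ih t _ (by simpa using Nat.le_of_succ_le_succ h)]
        simp [hc]

theorem pv_replace_space (l : List Char) :
    PySem.Chars.replace l [' '] ['-'] = l.map (fun c => if c = ' ' then '-' else c) := by
  simpa [PySem.Chars.replace] using pv_go_space l.length l [] le_rfl

theorem pv_lower_ne_space (c : Char) (h : pvIsAsciiLetter c = true) :
    PySem.Chars.lowerChar c ≠ ' ' := by
  unfold pvIsAsciiLetter at h
  unfold PySem.Chars.lowerChar
  intro hcontra
  split at hcontra
  · rename_i hu
    unfold PySem.Chars.isupper at hu
    simp only [Bool.and_eq_true, decide_eq_true_eq] at hu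
    have h1 : 65 ≤ c.toNat := by
      have := hu.1; rw [Char.le_def, UInt32.le_iff_toNat_le] at this; exact this
    have h2 : c.toNat ≤ 90 := by
      have := hu.2; rw [Char.le_def, UInt32.le_iff_toNat_le] at this; exact this
    have hv : (Char.ofNat (c.toNat + 32)).toNat = c.toNat + 32 := by
      rw [Char.toNat_ofNat, if_pos (Or.inl (by omega))]
    have hmm := congrArg Char.toNat hcontra
    rw [hv] at hmm
    have : c.toNat + 32 = 32 := hmm
    omega
  · subst hcontra
    exact absurd h (by decide)

theorem pv_toList_inj (a b : String) (h : a.toList = b.toList) : a = b := by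
  rw [← String.ofList_toList (s := a), h, String.ofList_toList]

-- ===== VERDICT (by name: the statement is the Claim_ definition above) =====
theorem slugfy_spec : Claim_equal_slugfy := by
  intro s _
  unfold Spec_slugfy slugfy slugfy_alt
  simp only [pv_foldl_eq, List.nil_append]
  set M := s.toList.filter fun c => pvIsAsciiLetter c || c == ' ' with hM
  have hmap : (M.map PySem.Chars.lowerChar).map (fun c => if c = ' ' then '-' else c)
      = M.map (fun c => if c = ' ' then '-' else PySem.Chars.lowerChar c) := by
    rw [List.map_map]
    apply List.map_congr_left
    intro a ha
    have hp : (pvIsAsciiLetter a || (a == ' ')) = true := (List.mem_filter.mp ha).2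
    by_cases hsp : a = ' '
    · subst hsp; simp [Function.comp]; decide
    · have hl : pvIsAsciiLetter a = true := by
        simp only [Bool.or_eq_true, beq_iff_eq] at hp
        rcases hp with h' | h'
        · exact h'
        · exact absurd h' hsp
      simp [Function.comp, pv_lower_ne_space a hl, hsp]
  have hslug : (PySem.Str.replace (PySem.Str.lower (String.ofList M)) " " "-").toList
      = M.map (fun c => if c = ' ' then '-' else PySem.Chars.lowerChar c) := by
    rw [PySem.Str.toList_replace, PySem.Str.toList_lower]
    have : (String.ofList M).toList = M := by simp
    rw [this]
    show PySem.Chars.replace (PySem.Chars.lower M) [' '] ['-'] = _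
    rw [PySem.Chars.lower, pv_replace_space, hmap]
  apply pv_toList_inj
  by_cases hnil : M.map (fun c => if c = ' ' then '-' else PySem.Chars.lowerChar c) = []
  · have hempty : PySem.Str.replace (PySem.Str.lower (String.ofList M)) " " "-" = "" := by
      apply pv_toList_inj; rw [hslug, hnil]; rfl
    simp [hnil, hempty]
  · have hne : PySem.Str.replace (PySem.Str.lower (String.ofList M)) " " "-" ≠ "" := by
      intro hcontra
      apply hnil
      rw [← hslug, hcontra]; rfl
    simp [hnil, hne, hslug]
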